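-- pv_equiv track=rewrite | github.com/edumantovani/rpaframework | tools/docgen.py | _strip_empty
-- ===== SOURCE A (Python) =====
-- def _strip_empty(lines):
--     """Remove empty lines at the beginning and end of a block."""
--     if not lines:
--         return []
--
--     start = None
--     for idx, line in enumerate(lines):
--         if line:
--             start = idx
--             break
--
--     if start is None:
--         return []
--
--     end = None
--     for idx, line in reversed(list(enumerate(lines))):
--         if line:
--             end = idx
--             break
--
--     return lines[start : end + 1]
-- ===== SOURCE B (Python) =====
-- def _strip_empty(lines):
--     """Remove empty lines at the beginning and end of a block."""
--     idx = [i for i, line in enumerate(lines) if line]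
--     if not idx:
--         return []
--     return lines[idx[0] : idx[-1] + 1]
-- ===== Notes on version B (the rewrite author's own statement) =====
-- stated objective: simpler
-- what changed: Replaces the two early-breaking forward/reversed boundary scans with one full pass that collects the indices of all non-empty lines, then slices between the first and last collected index.
import Mathlib
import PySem

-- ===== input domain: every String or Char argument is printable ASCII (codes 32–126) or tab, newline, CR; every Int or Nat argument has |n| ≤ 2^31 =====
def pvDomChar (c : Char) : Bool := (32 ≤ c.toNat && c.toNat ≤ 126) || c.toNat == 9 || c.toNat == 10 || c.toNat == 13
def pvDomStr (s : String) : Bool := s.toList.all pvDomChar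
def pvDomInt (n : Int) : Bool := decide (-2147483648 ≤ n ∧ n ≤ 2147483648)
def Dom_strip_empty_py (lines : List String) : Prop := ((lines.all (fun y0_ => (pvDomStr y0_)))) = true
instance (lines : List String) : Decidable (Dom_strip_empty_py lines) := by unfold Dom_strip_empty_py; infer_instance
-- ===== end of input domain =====

-- B replaces A's two early-breaking forward/reversed boundary scans by one full pass
-- collecting the indices of all non-empty lines, then one slice (objective: simpler).

-- ===== PORT A =====
-- the 'for … if line: …; break' loops of A: first truthy index of an enumerate list
def stripEmptyFirstTruthy : List (Int × String) → Option Int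
  | [] => none
  | (i, s) :: rest => if s ≠ "" then some i else stripEmptyFirstTruthy rest

def strip_empty_py (lines : List String) : List String :=
  if lines = [] then []
  else
    match stripEmptyFirstTruthy (PySem.List.enumerate lines 0) with
    | none => []
    | some start =>
      -- second loop over reversed(list(enumerate(lines))); its 'none' case is unreachable in Python
      match stripEmptyFirstTruthy (PySem.List.enumerate lines 0).reverse with
      | none => []
      | some e => PySem.List.slice lines (some start) (some (e + 1))

-- ===== PORT B =====
def strip_empty_py_alt (lines : List String) : List String :=
  let idx := (PySem.List.enumerate lines 0).foldl
    (fun acc p => if p.2 ≠ "" then acc ++ [p.1] else acc) []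
  match idx with
  | [] => []
  | i :: rest => PySem.List.slice lines (some i) (some ((i :: rest).getLast (by simp) + 1))

-- ===== PRECONDITION & SPEC =====
def Spec_strip_empty_py (lines : List String) (out : List String) : Prop := out = strip_empty_py_alt lines
instance (lines : List String) (out : List String) : Decidable (Spec_strip_empty_py lines out) := by unfold Spec_strip_empty_py; infer_instance

-- ===== CLAIM (what is proved, stated in full; the proofs are below) =====
def Claim_equal_strip_empty_py : Prop := ∀ (lines : List String), Dom_strip_empty_py lines → Spec_strip_empty_py lines (strip_empty_py lines)

-- ===== LEMMAS AND PROOFS =====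
def stripEmptyCollect (l : List (Int × String)) : List Int :=
  (l.filter (fun p => p.2 ≠ "")).map (·.1)

theorem firstTruthy_eq_collect_head (l : List (Int × String)) :
    stripEmptyFirstTruthy l = (stripEmptyCollect l).head? := by
  induction l with
  | nil => rfl
  | cons p rest ih =>
    obtain ⟨i, s⟩ := p
    by_cases h : s = ""
    · simp only [stripEmptyFirstTruthy, stripEmptyCollect, h] at ih ⊢
      simpa [stripEmptyCollect, h] using ih
    · simp [stripEmptyFirstTruthy, stripEmptyCollect, h]

theorem collect_reverse (l : List (Int × String)) :
    stripEmptyCollect l.reverse = (stripEmptyCollect l).reverse := by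
  simp [stripEmptyCollect, List.filter_reverse, List.map_reverse]

theorem strip_empty_py_spec : Claim_equal_strip_empty_py := by
  intro lines _
  show strip_empty_py lines = strip_empty_py_alt lines
  unfold strip_empty_py strip_empty_py_alt
  have hfold : ((PySem.List.enumerate lines 0).foldl
      (fun acc p => if p.2 ≠ "" then acc ++ [p.1] else acc) [])
      = stripEmptyCollect (PySem.List.enumerate lines 0) := by
    simpa [stripEmptyCollect] using
      PySem.List.foldl_append_if (l := PySem.List.enumerate lines 0) (acc := [])
        (fun p : Int × String => p.2 ≠ "") (fun p => p.1)
  simp only [hfold]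
  rcases h : stripEmptyCollect (PySem.List.enumerate lines 0) with _ | ⟨i, rest⟩
  · -- no truthy line: both return []
    rw [firstTruthy_eq_collect_head, h]
    split <;> simp [stripEmptyCollect] at h ⊢
  · have hstart : stripEmptyFirstTruthy (PySem.List.enumerate lines 0) = some i := by
      rw [firstTruthy_eq_collect_head, h]; rfl
    have hend : stripEmptyFirstTruthy (PySem.List.enumerate lines 0).reverse
        = some ((i :: rest).getLast (by simp)) := by
      rw [firstTruthy_eq_collect_head, collect_reverse, h, List.head?_reverse,
        List.getLast?_eq_some_getLast]
    have hne : lines ≠ [] := by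
      intro hnil; rw [hnil] at h; simp [stripEmptyCollect, PySem.List.enumerate] at h
    simp [hne, hstart, hend]

-- ===== VERDICT (by name: the statement is the Claim_ definition above) =====
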